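-- pv_equiv track=rewrite | github.com/joaopedro13579/tr1-dnv | camada_fisica.py | bipolar
-- ===== SOURCE A (Python) =====
-- def bipolar(bit_stream):
--     #Se o bit for 0, sinal digital correspondente é 0, e se for 1, alterna entre 1 e -1
--     dig_signal = []
--     flag = 0
--     for bit in bit_stream:
--         if bit == "1":
--             if flag == 0:
--                 dig_signal.append(1)
--                 flag = 1
--             else:
--                 dig_signal.append(-1)
--                 flag = 0
--         else:
--             dig_signal.append(0)
--     return dig_signal
-- ===== SOURCE B (Python) =====
-- from itertools import accumulate
--
-- def bipolar(bit_stream):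
--     bits = list(bit_stream)
--     counts = list(accumulate(1 if b == "1" else 0 for b in bits))
--     return [(1 if c % 2 == 1 else -1) if b == "1" else 0
--             for b, c in zip(bits, counts)]
-- ===== Notes on version B (the rewrite author's own statement) =====
-- stated objective: alternative
-- what changed: Replaces the stateful flag toggle with a precomputed prefix table of cumulative '1'-counts (itertools.accumulate) plus a parity lookup per position.
import Mathlib
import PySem

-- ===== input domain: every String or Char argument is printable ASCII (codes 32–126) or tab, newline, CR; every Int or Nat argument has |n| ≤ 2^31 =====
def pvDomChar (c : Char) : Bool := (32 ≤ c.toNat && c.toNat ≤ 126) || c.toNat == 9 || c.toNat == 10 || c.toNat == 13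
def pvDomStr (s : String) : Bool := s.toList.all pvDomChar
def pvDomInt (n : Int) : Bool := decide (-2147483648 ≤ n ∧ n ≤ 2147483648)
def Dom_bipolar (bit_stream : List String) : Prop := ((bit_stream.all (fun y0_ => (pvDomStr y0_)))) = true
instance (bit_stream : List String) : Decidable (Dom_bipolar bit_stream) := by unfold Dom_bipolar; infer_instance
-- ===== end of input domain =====

-- B replaces A's stateful flag toggle with a prefix table of cumulative '1'-counts and a parity lookup (alternative decomposition, same cost).


-- ===== PORT A =====
-- literal port of A: a foldl over the bits carrying (dig_signal, flag)
def bipolar (bit_stream : List String) : List Int :=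
  (bit_stream.foldl
    (fun (st : List Int × Int) bit =>
      if bit = "1" then
        if st.2 = 0 then (st.1 ++ [1], 1) else (st.1 ++ [-1], 0)
      else (st.1 ++ [0], st.2))
    ([], 0)).1

-- ===== PORT B =====
-- itertools.accumulate over (1 if b=="1" else 0): running count, emitting each partial sum
def bipolarAcc : List String → Int → List Int
  | [], _ => []
  | b :: rest, acc =>
      let acc' := acc + (if b = "1" then 1 else 0)
      acc' :: bipolarAcc rest acc'

def bipolar_alt (bit_stream : List String) : List Int :=
  (bit_stream.zip (bipolarAcc bit_stream 0)).map
    (fun p => if p.1 = "1" then (if p.2 % 2 = 1 then 1 else -1) else 0)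

-- ===== PRECONDITION & SPEC =====
def Spec_bipolar (bit_stream : List String) (out : List Int) : Prop := out = bipolar_alt bit_stream
instance (bit_stream : List String) (out : List Int) : Decidable (Spec_bipolar bit_stream out) := by unfold Spec_bipolar; infer_instance

-- ===== CLAIM (what is proved, stated in full; the proofs are below) =====
def Claim_equal_bipolar : Prop := ∀ (bit_stream : List String), Dom_bipolar bit_stream → Spec_bipolar bit_stream (bipolar bit_stream)

-- ===== LEMMAS AND PROOFS =====

-- recursive form of A's loop (proof device)
def bipolarGo : List String → Int → List Int
  | [], _ => []
  | b :: rest, flag =>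
      if b = "1" then
        if flag = 0 then 1 :: bipolarGo rest 1 else (-1) :: bipolarGo rest 0
      else 0 :: bipolarGo rest flag

theorem bipolar_foldl_eq_go (bs : List String) (acc : List Int) (flag : Int) :
    (bs.foldl
      (fun (st : List Int × Int) bit =>
        if bit = "1" then
          if st.2 = 0 then (st.1 ++ [1], 1) else (st.1 ++ [-1], 0)
        else (st.1 ++ [0], st.2))
      (acc, flag)).1 = acc ++ bipolarGo bs flag := by
  induction bs generalizing acc flag with
  | nil => simp [bipolarGo]
  | cons b rest ih =>
      simp only [List.foldl_cons, bipolarGo]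
      by_cases hb : b = "1"
      · by_cases hf : flag = 0 <;> simp [hb, hf, ih]
      · simp [hb, ih]

theorem bipolarGo_eq_zipmap (bs : List String) (flag c : Int) (h : flag = c % 2) :
    bipolarGo bs flag =
      (bs.zip (bipolarAcc bs c)).map
        (fun p => if p.1 = "1" then (if p.2 % 2 = 1 then 1 else -1) else 0) := by
  induction bs generalizing flag c with
  | nil => simp [bipolarGo, bipolarAcc]
  | cons b rest ih =>
      by_cases hb : b = "1"
      · simp only [bipolarGo, bipolarAcc, hb]
        by_cases hf : flag = 0
        · have hc : (c + 1) % 2 = 1 := by omega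
          simp [hf, hc, ih 1 (c + 1) (by omega)]
        · have hc : ¬ (c + 1) % 2 = 1 := by omega
          simp [hf, hc, ih 0 (c + 1) (by omega)]
      · simp only [bipolarGo, bipolarAcc, hb]
        simp [hb, ih flag (c + 0) (by omega)]

-- ===== VERDICT (by name: the statement is the Claim_ definition above) =====
theorem bipolar_spec : Claim_equal_bipolar := by
  intro bs _
  show bipolar bs = bipolar_alt bs
  unfold bipolar bipolar_alt
  rw [bipolar_foldl_eq_go, bipolarGo_eq_zipmap bs 0 0 rfl]
  simp
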